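-- pv_equiv track=rewrite | github.com/Nighteyez07/AdventOfCode2021 | day03.py | filterOxy
-- ===== SOURCE A (Python) =====
-- def filterOxy(array, position):
--     returnArr = []
--     onCnt = 0
--     offCnt = 0
--     keep = ""
--
--     for item in array:
--         if item[position] == "1":
--             onCnt = onCnt + 1
--         else:
--             offCnt = offCnt + 1
--
--     if onCnt >= offCnt:
--         keep = "1"
--     else:
--         keep = "0"
--
--     for item in array:
--         if item[position] == keep:
--             returnArr.append(item)
--
--     return returnArr
-- ===== SOURCE B (Python) =====
-- def filterOxy(array, position):
--     ones = []
--     zeros = []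
--     for item in array:
--         c = item[position]
--         if c == "1":
--             ones.append(item)
--         elif c == "0":
--             zeros.append(item)
--     return ones if 2 * len(ones) >= len(array) else zeros
-- ===== Notes on version B (the rewrite author's own statement) =====
-- stated objective: simpler
-- what changed: Single-pass partition into ones/zeros lists with a final length comparison (2*len(ones) >= len(array)) replaces A's count pass followed by a separate filter pass.
import Mathlib
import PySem

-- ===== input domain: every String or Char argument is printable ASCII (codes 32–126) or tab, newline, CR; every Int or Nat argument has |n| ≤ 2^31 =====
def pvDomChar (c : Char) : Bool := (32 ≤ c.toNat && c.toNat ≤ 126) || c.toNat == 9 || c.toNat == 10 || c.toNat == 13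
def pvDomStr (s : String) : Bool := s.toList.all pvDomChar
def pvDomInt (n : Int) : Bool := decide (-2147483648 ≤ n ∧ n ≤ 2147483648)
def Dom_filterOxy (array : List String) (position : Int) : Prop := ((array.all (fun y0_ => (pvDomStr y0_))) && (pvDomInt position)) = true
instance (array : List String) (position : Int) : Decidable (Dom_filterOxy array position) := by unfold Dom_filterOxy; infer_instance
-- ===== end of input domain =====

-- B replaces A's count-then-filter two-pass structure by a single-pass partition into ones/zeros
-- plus a final length comparison (objective: simpler).


-- ===== PORT A =====
-- A: first loop counts on/off bits at `position`, chooses keep = '1' iff onCnt ≥ offCnt,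
-- second loop appends every item whose char at `position` equals keep.
def filterOxy (array : List String) (position : Int) : List String :=
  let counts : Int × Int :=
    array.foldl
      (fun p item =>
        if PySem.Str.pyGet? item position = some '1' then (p.1 + 1, p.2) else (p.1, p.2 + 1))
      (0, 0)
  let keep : Char := if counts.1 ≥ counts.2 then '1' else '0'
  array.foldl
    (fun acc item => if PySem.Str.pyGet? item position = some keep then acc ++ [item] else acc)
    []

-- ===== PORT B =====
-- B: one pass partitioning into ones/zeros, then a length comparison.
def filterOxy_alt (array : List String) (position : Int) : List String :=
  let st : List String × List String :=
    array.foldl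
      (fun p item =>
        let c := PySem.Str.pyGet? item position
        if c = some '1' then (p.1 ++ [item], p.2)
        else if c = some '0' then (p.1, p.2 ++ [item])
        else p)
      ([], [])
  if 2 * (st.1.length : Int) ≥ (array.length : Int) then st.1 else st.2

-- ===== PRECONDITION & SPEC =====
-- Pre_ excludes exactly the inputs where Python A raises IndexError: some item has no
-- character at `position` (B raises there too).
def Pre_filterOxy (array : List String) (position : Int) : Prop :=
  ∀ s ∈ array, PySem.Raise.InRange s.toList.length position
instance (array : List String) (position : Int) : Decidable (Pre_filterOxy array position) := by
  unfold Pre_filterOxy; infer_instance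
def pvWitness_filterOxy : List String × Int := (["10", "01", "11"], 0)
def Spec_filterOxy (array : List String) (position : Int) (out : List String) : Prop := out = filterOxy_alt array position
instance (array : List String) (position : Int) (out : List String) : Decidable (Spec_filterOxy array position out) := by unfold Spec_filterOxy; infer_instance

-- ===== CLAIM (what is proved, stated in full; the proofs are below) =====
def Claim_equal_filterOxy : Prop := ∀ (array : List String) (position : Int), Dom_filterOxy array position → Pre_filterOxy array position → Spec_filterOxy array position (filterOxy array position)

-- ===== LEMMAS AND PROOFS =====

-- A's counting loop: the pair is (initial + #ones, initial + #non-ones).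
theorem countLoop_eq (g : String → Option Char) (xs : List String) (c1 c2 : Int) :
    xs.foldl (fun p item => if g item = some '1' then (p.1 + 1, p.2) else (p.1, p.2 + 1)) (c1, c2)
      = (c1 + (xs.countP (fun item => g item = some '1') : Int),
         c2 + (xs.countP (fun item => ¬ g item = some '1') : Int)) := by
  induction xs generalizing c1 c2 with
  | nil => simp
  | cons x xs ih =>
    by_cases h : g x = some '1' <;>
      simp [h, ih] <;> ring_nf

-- B's partitioning loop: first component collects the '1'-items, second the '0'-items.
theorem partLoop_eq (g : String → Option Char) (xs : List String) (l1 l2 : List String) :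
    xs.foldl
      (fun p item =>
        let c := g item
        if c = some '1' then (p.1 ++ [item], p.2)
        else if c = some '0' then (p.1, p.2 ++ [item])
        else p)
      (l1, l2)
      = (l1 ++ xs.filter (fun item => g item = some '1'),
         l2 ++ xs.filter (fun item => g item = some '0')) := by
  induction xs generalizing l1 l2 with
  | nil => simp
  | cons x xs ih =>
    by_cases h1 : g x = some '1'
    · simp [h1, ih]
    · by_cases h0 : g x = some '0' <;> simp [h1, h0, ih]

-- A's second loop is a filter (Prop-conditioned ite, so stated for this program).
theorem filterLoop_eq (g : String → Option Char) (k : Char) (xs : List String) (acc : List String) :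
    xs.foldl (fun a item => if g item = some k then a ++ [item] else a) acc
      = acc ++ xs.filter (fun item => g item = some k) := by
  induction xs generalizing acc with
  | nil => simp
  | cons x xs ih =>
    by_cases h : g x = some k <;> simp [h, ih]

-- Non-'1' items are exactly the complement of the '1' items.
theorem countP_not_eq (g : String → Option Char) (xs : List String) :
    xs.countP (fun item => ¬ g item = some '1')
      = xs.length - xs.countP (fun item => g item = some '1') := by
  have hsum := List.length_eq_countP_add_countP
    (l := xs) (p := fun item => decide (g item = some '1'))
  have hcongr : xs.countP (fun item => decide (¬ g item = some '1'))
      = xs.countP (fun a => !(decide (g a = some '1'))) :=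
    List.countP_congr (fun a _ => by simp)
  simp only [Bool.not_eq_true] at hsum
  have hcongr2 : xs.countP (fun a => decide (decide (g a = some '1') = false))
      = xs.countP (fun a => !(decide (g a = some '1'))) :=
    List.countP_congr (fun a _ => by simp)
  omega

theorem filterOxy_eq_alt (array : List String) (position : Int) :
    filterOxy array position = filterOxy_alt array position := by
  unfold filterOxy filterOxy_alt
  rw [countLoop_eq, partLoop_eq, filterLoop_eq]
  dsimp only
  simp only [List.nil_append, zero_add, ← List.countP_eq_length_filter,
    countP_not_eq (fun item => PySem.Str.pyGet? item position) array]
  have hle := List.countP_le_length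
    (p := fun item => decide (PySem.Str.pyGet? item position = some '1')) (l := array)
  have hiff :
      ((array.countP (fun item => decide (PySem.Str.pyGet? item position = some '1')) : Int)
        ≥ ((array.length
            - array.countP (fun item => decide (PySem.Str.pyGet? item position = some '1')) : Nat) : Int))
      ↔ (2 * (array.countP (fun item => decide (PySem.Str.pyGet? item position = some '1')) : Int)
        ≥ (array.length : Int)) := by omega
  by_cases h : 2 * (array.countP (fun item => decide (PySem.Str.pyGet? item position = some '1')) : Int)
      ≥ (array.length : Int)
  · rw [if_pos (hiff.mpr h), if_pos h]
  · rw [if_neg (fun hA => h (hiff.mp hA)), if_neg h]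

-- ===== VERDICT (by name: the statement is the Claim_ definition above) =====
theorem filterOxy_spec : Claim_equal_filterOxy := by
  intro array position _ _
  unfold Spec_filterOxy
  exact filterOxy_eq_alt array position
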